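-- pv_equiv track=rewrite | github.com/jacobwilki01/EECS-210 | Prog_Assignment_3/main.py | reflex
-- ===== SOURCE A (Python) =====
-- def reflex(set, relation):
--     #creates two new variables that are used to determine if the result is True.
--     check = True
--     error = None
--
--     #iterates over both the set and relation
--     for num in set:
--         for pair in relation:
--             #checks if the each value of each ordered pair are both one value in the set. if they are not the same, it runs the following
--             if (pair[0] != num and pair[1] == num) or (pair[1] != num and pair[0] == num):
--                 check = False #turns the boolean above to False
--                 error = pair #makes the previously defined 'error' value hold the ordered pair that 'broke' it.
--                 break #breaks the relation iteration.
--         if not check: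
--             break #breaks the set iteration.
--
--     #determines what string to return. if it is reflexive, check = True. If not, the returned string includes error.
--     if not check:
--         return f"not reflexive because of {error}"
--     else:
--         return f"reflexive at all points."
-- ===== SOURCE B (Python) =====
-- def reflex(set, relation):
--     # Index each value by the first pair (in relation order) that contains it
--     # together with a different value; stop indexing as soon as the most
--     # preferred set element is resolved; then a single scan of the set.
--     first = {}
--     target = set[0] if set else None
--     for pair in relation:
--         a, b = pair
--         if a != b:
--             if a not in first:
--                 first[a] = pair
--             if b not in first:
--                 first[b] = pair
--         if target is not None and target in first:
--             break
--     for num in set: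
--         if num in first:
--             return f"not reflexive because of {first[num]}"
--     return f"reflexive at all points."
-- ===== Notes on version B (the rewrite author's own statement) =====
-- stated objective: faster
-- what changed: Replaces the nested set-by-relation scan with a single pass that indexes each value to the first unequal pair containing it (stopping early once the first set element is resolved), then one scan of the set.
import Mathlib
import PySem

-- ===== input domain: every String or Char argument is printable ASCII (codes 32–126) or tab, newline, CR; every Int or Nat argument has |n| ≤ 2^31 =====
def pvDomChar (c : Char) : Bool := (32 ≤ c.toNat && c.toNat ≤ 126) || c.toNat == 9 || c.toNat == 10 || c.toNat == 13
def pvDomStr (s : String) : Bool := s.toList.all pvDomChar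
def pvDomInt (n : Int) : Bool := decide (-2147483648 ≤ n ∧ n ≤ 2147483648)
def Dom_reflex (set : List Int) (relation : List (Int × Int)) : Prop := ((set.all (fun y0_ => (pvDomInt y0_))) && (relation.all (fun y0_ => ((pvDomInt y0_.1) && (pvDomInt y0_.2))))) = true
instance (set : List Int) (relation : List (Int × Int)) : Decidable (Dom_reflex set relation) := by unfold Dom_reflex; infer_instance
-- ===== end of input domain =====

-- B replaces A's nested set×relation scan by a one-pass index from value to the first
-- unequal pair containing it (stopping once the first set element is resolved),
-- then a single scan of the set (objective: faster; measured).

-- f-string rendering shared by both ports (both Pythons format the tuple identically)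
def fmtBroken (p : Int × Int) : String :=
  "not reflexive because of (" ++ PySem.Int.toStr p.1 ++ ", " ++ PySem.Int.toStr p.2 ++ ")"

-- ===== PORT A =====
-- A's inner loop: first pair that 'breaks' num (break returns it), else None
def reflexInner (num : Int) : List (Int × Int) → Option (Int × Int)
  | [] => none
  | p :: rest =>
      if (p.1 ≠ num ∧ p.2 = num) ∨ (p.2 ≠ num ∧ p.1 = num) then some p
      else reflexInner num rest

-- A's outer loop over the set, breaking at the first num whose inner loop broke
def reflexOuter (relation : List (Int × Int)) : List Int → Option (Int × Int)
  | [] => none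
  | n :: ns =>
      match reflexInner n relation with
      | some p => some p
      | none => reflexOuter relation ns

def reflex (set : List Int) (relation : List (Int × Int)) : String :=
  match reflexOuter relation set with
  | some p => fmtBroken p
  | none => "reflexive at all points."

-- ===== PORT B =====
-- one iteration of Source B's indexing loop body (the `if a != b:` block)
def stepIdx (d : PySem.Dict Int (Int × Int)) (p : Int × Int) : PySem.Dict Int (Int × Int) :=
  if p.1 ≠ p.2 then
    let d1 := if d.contains p.1 then d else d.insert p.1 p
    if d1.contains p.2 then d1 else d1.insert p.2 p
  else d

-- Source B's first loop: dict value -> first unequal pair containing it, with the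
-- early `break` once `target` (set[0], if any) is a key
def buildFirst (target : Option Int) : List (Int × Int) → PySem.Dict Int (Int × Int) → PySem.Dict Int (Int × Int)
  | [], d => d
  | p :: rest, d =>
      let d' := stepIdx d p
      if (match target with | some t => d'.contains t | none => false) then d'
      else buildFirst target rest d'

-- Source B's second loop: scan the set once, early return on a hit
def reflexScan (first : PySem.Dict Int (Int × Int)) : List Int → String
  | [] => "reflexive at all points."
  | n :: ns =>
      match first.get? n with
      | some p => fmtBroken p
      | none => reflexScan first ns

def reflex_alt (set : List Int) (relation : List (Int × Int)) : String :=
  reflexScan (buildFirst set.head? relation PySem.Dict.empty) set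

-- ===== PRECONDITION & SPEC =====
def Spec_reflex (set : List Int) (relation : List (Int × Int)) (out : String) : Prop := out = reflex_alt set relation
instance (set : List Int) (relation : List (Int × Int)) (out : String) : Decidable (Spec_reflex set relation out) := by unfold Spec_reflex; infer_instance

-- ===== CLAIM (what is proved, stated in full; the proofs are below) =====
def Claim_equal_reflex : Prop := ∀ (set : List Int) (relation : List (Int × Int)), Dom_reflex set relation → Spec_reflex set relation (reflex set relation)

-- ===== LEMMAS AND PROOFS =====

-- A's inner scan splits at the head
lemma inner_cons (num : Int) (p : Int × Int) (rest : List (Int × Int)) :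
    reflexInner num (p :: rest) = (reflexInner num [p]).or (reflexInner num rest) := by
  simp only [reflexInner]
  split <;> simp

-- one step of Source B's indexing loop, seen through get?
lemma stepIdx_get? (d : PySem.Dict Int (Int × Int)) (p : Int × Int) (num : Int) :
    (stepIdx d p).get? num = (d.get? num).or (reflexInner num [p]) := by
  unfold stepIdx
  by_cases hne : p.1 ≠ p.2
  · simp only [if_pos hne]
    by_cases h1 : num = p.1
    · have hp2 : p.2 ≠ num := by rw [h1]; exact fun h => hne h.symm
      have hcond : reflexInner num [p] = some p := by
        simp only [reflexInner]
        rw [if_pos (Or.inr ⟨hp2, h1.symm⟩)]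
      rw [hcond]
      have hb : num ≠ p.2 := fun h => hp2 h.symm
      by_cases hc : d.contains p.1
      · simp only [if_pos hc]
        have hs : (d.get? num).isSome := by
          rw [← PySem.Dict.contains_eq_isSome_get?, h1]; exact hc
        obtain ⟨v, hv⟩ := Option.isSome_iff_exists.mp hs
        have : (if (d.contains p.2) = true then d else d.insert p.2 p).get? num
            = d.get? num := by
          split
          · rfl
          · exact PySem.Dict.get?_insert_of_ne d p hb
        rw [this, hv]; rfl
      · simp only [if_neg hc]
        have hd : d.get? num = none := by
          rw [PySem.Dict.get?_eq_none_iff_contains, h1]; simpa using hc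
        have hget : (d.insert p.1 p).get? num = some p := by
          rw [h1]; exact PySem.Dict.get?_insert_self d p.1 p
        have : (if ((d.insert p.1 p).contains p.2) = true then d.insert p.1 p
                else (d.insert p.1 p).insert p.2 p).get? num = some p := by
          split
          · exact hget
          · rw [PySem.Dict.get?_insert_of_ne _ p hb]; exact hget
        rw [this, hd]; rfl
    · by_cases h2 : num = p.2
      · have hp1 : p.1 ≠ num := fun h => h1 h.symm
        have hcond : reflexInner num [p] = some p := by
          simp only [reflexInner]
          rw [if_pos (Or.inl ⟨hp1, h2.symm⟩)]
        rw [hcond]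
        have step1 : (if (d.contains p.1) = true then d else d.insert p.1 p).get? num
            = d.get? num := by
          split
          · rfl
          · exact PySem.Dict.get?_insert_of_ne d p h1
        set d1 := if (d.contains p.1) = true then d else d.insert p.1 p with hd1
        by_cases hc : d1.contains p.2
        · simp only [if_pos hc]
          have hs : (d1.get? num).isSome := by
            rw [← PySem.Dict.contains_eq_isSome_get?, h2]; exact hc
          obtain ⟨v, hv⟩ := Option.isSome_iff_exists.mp hs
          rw [hv]
          rw [step1] at hv
          rw [hv]; rfl
        · simp only [if_neg hc]
          have hget : (d1.insert p.2 p).get? num = some p := by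
            rw [h2]; exact PySem.Dict.get?_insert_self d1 p.2 p
          have hd : d.get? num = none := by
            rw [← step1, PySem.Dict.get?_eq_none_iff_contains, h2]
            simpa using hc
          rw [hget, hd]; rfl
      · have hnc : ¬(p.1 ≠ num ∧ p.2 = num ∨ p.2 ≠ num ∧ p.1 = num) := by
          rintro (⟨-, h⟩ | ⟨-, h⟩)
          · exact h2 h.symm
          · exact h1 h.symm
        have hcond : reflexInner num [p] = none := by
          simp only [reflexInner]
          rw [if_neg hnc]
        rw [hcond]
        have step1 : (if (d.contains p.1) = true then d else d.insert p.1 p).get? num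
            = d.get? num := by
          split
          · rfl
          · exact PySem.Dict.get?_insert_of_ne d p h1
        set d1 := if (d.contains p.1) = true then d else d.insert p.1 p with hd1
        have step2 : (if (d1.contains p.2) = true then d1 else d1.insert p.2 p).get? num
            = d1.get? num := by
          split
          · rfl
          · exact PySem.Dict.get?_insert_of_ne d1 p h2
        rw [step2, step1, Option.or_none]
  · simp only [if_neg hne]
    have hne' : p.1 = p.2 := not_not.mp hne
    have hnc : ¬(p.1 ≠ num ∧ p.2 = num ∨ p.2 ≠ num ∧ p.1 = num) := by
      rintro (⟨h, h'⟩ | ⟨h, h'⟩)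
      · exact h (hne' ▸ h')
      · exact h (hne'.symm ▸ h')
    have hcond : reflexInner num [p] = none := by
      simp only [reflexInner]
      rw [if_neg hnc]
    rw [hcond, Option.or_none]

-- the full (break-free) indexing fold: lookup = A's inner scan, with an
-- arbitrary accumulator dict taking precedence
lemma fold_get? (rel : List (Int × Int)) :
    ∀ (d : PySem.Dict Int (Int × Int)) (num : Int),
      (rel.foldl stepIdx d).get? num = (d.get? num).or (reflexInner num rel) := by
  induction rel with
  | nil => intro d num; simp [reflexInner]
  | cons p rest ih =>
      intro d num
      simp only [List.foldl_cons]
      rw [ih, stepIdx_get?, Option.or_assoc, ← inner_cons]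

-- the early break never changes what the target key maps to
lemma buildFirst_get?_target (rel : List (Int × Int)) :
    ∀ (d : PySem.Dict Int (Int × Int)) (t : Int),
      (buildFirst (some t) rel d).get? t = (rel.foldl stepIdx d).get? t := by
  induction rel with
  | nil => intro d t; rfl
  | cons p rest ih =>
      intro d t
      simp only [buildFirst, List.foldl_cons]
      by_cases hc : (stepIdx d p).contains t
      · simp only [if_pos hc]
        have hs : ((stepIdx d p).get? t).isSome := by
          rw [← PySem.Dict.contains_eq_isSome_get?]; exact hc
        obtain ⟨v, hv⟩ := Option.isSome_iff_exists.mp hs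
        rw [fold_get?, hv]; rfl
      · simp only [if_neg hc]
        exact ih (stepIdx d p) t

-- if the target key never appears, the early break never fires
lemma buildFirst_of_target_absent (rel : List (Int × Int)) :
    ∀ (d : PySem.Dict Int (Int × Int)) (t : Int),
      (rel.foldl stepIdx d).get? t = none →
      buildFirst (some t) rel d = rel.foldl stepIdx d := by
  induction rel with
  | nil => intro d t _; rfl
  | cons p rest ih =>
      intro d t h
      simp only [List.foldl_cons] at h
      have hd' : ((stepIdx d p).get? t) = none := by
        rw [fold_get?] at h
        cases hx : (stepIdx d p).get? t with
        | none => rfl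
        | some v => rw [hx] at h; exact absurd h (by simp)
      have hc : (stepIdx d p).contains t = false := by
        rw [PySem.Dict.contains_eq_isSome_get?, hd']; rfl
      simp only [buildFirst, List.foldl_cons, hc]
      exact ih (stepIdx d p) t h

-- scan of the FULL index = A's outer loop
lemma scan_full_eq_outer (rel : List (Int × Int)) :
    ∀ set : List Int,
      reflexScan (rel.foldl stepIdx PySem.Dict.empty) set
        = match reflexOuter rel set with
          | some p => fmtBroken p
          | none => "reflexive at all points." := by
  intro set
  induction set with
  | nil => rfl
  | cons n ns ih =>
      have hget : (rel.foldl stepIdx PySem.Dict.empty).get? n = reflexInner n rel := by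
        rw [fold_get?]; simp
      simp only [reflexScan, reflexOuter, hget]
      cases reflexInner n rel with
      | none => exact ih
      | some p => rfl

-- ===== VERDICT (by name: the statement is the Claim_ definition above) =====
theorem reflex_spec : Claim_equal_reflex := by
  intro set relation _
  unfold Spec_reflex reflex reflex_alt
  cases set with
  | nil => rfl
  | cons n ns =>
      simp only [List.head?_cons]
      cases hfull : (relation.foldl stepIdx PySem.Dict.empty).get? n with
      | none =>
          rw [buildFirst_of_target_absent relation PySem.Dict.empty n hfull,
              scan_full_eq_outer]
      | some p =>
          have hget : (buildFirst (some n) relation PySem.Dict.empty).get? n = some p := by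
            rw [buildFirst_get?_target]; exact hfull
          have hinner : reflexInner n relation = some p := by
            rw [fold_get?] at hfull; simpa using hfull
          simp only [reflexScan, reflexOuter, hget, hinner]
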